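-- pv_equiv track=rewrite | github.com/Slooowlly/meu-modo-carreira-v4 | Logica/series_especiais.py | _gerar_meses_principais
-- ===== SOURCE A (Python) =====
-- def _gerar_meses_principais(total_rodadas: int) -> list[int]:
--     total = max(int(total_rodadas), 1)
--     meses = list(range(1, min(total, 10) + 1))
--     while len(meses) < total:
--         for mes in range(3, 11):
--             meses.append(mes)
--             if len(meses) >= total:
--                 break
--     return meses
-- ===== SOURCE B (Python) =====
-- def _gerar_meses_principais(total_rodadas: int) -> list[int]:
--     total = max(int(total_rodadas), 1)
--     return [i + 1 if i < 10 else 3 + (i - 10) % 8 for i in range(total)]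
-- ===== Notes on version B (the rewrite author's own statement) =====
-- stated objective: simpler
-- what changed: Replaced A's accumulate-and-break nested while/for cycling loop by a single comprehension mapping each output index directly to its value via a period-8 modular closed form.
import Mathlib
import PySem

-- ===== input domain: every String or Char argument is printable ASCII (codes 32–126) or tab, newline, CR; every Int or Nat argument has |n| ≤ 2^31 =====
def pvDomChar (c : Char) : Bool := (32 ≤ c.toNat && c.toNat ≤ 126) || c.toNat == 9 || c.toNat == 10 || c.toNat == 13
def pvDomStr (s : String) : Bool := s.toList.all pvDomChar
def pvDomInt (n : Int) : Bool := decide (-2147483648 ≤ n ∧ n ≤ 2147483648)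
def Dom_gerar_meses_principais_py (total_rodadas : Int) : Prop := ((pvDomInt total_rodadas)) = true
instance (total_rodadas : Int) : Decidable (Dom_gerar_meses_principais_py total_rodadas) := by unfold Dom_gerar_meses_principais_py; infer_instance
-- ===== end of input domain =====

-- B replaces A's accumulate-and-break cycling loop by a direct index-to-value
-- modular formula in one pass (objective: simpler).

-- ===== PORT A =====
-- inner 'for mes in range(3, 11): meses.append(mes); if len(meses) >= total: break'
def pyA_inner (total : Int) : List Int → List Int → List Int
  | acc, [] => acc
  | acc, m :: ms =>
    let acc' := acc ++ [m]
    if (acc'.length : Int) ≥ total then acc' else pyA_inner total acc' ms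

-- inner never shrinks the accumulator (used only for the outer loop's termination)
theorem pyA_inner_len_ge (total : Int) (ms acc : List Int) :
    acc.length ≤ (pyA_inner total acc ms).length := by
  induction ms generalizing acc with
  | nil => simp [pyA_inner]
  | cons m ms ih =>
    simp only [pyA_inner]
    split
    · simp
    · exact le_trans (by simp) (ih (acc ++ [m]))

theorem pyA_inner_len_gt (total m : Int) (ms acc : List Int) :
    acc.length < (pyA_inner total acc (m :: ms)).length := by
  simp only [pyA_inner]
  split
  · simp
  · exact lt_of_lt_of_le (by simp) (pyA_inner_len_ge total ms (acc ++ [m]))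

-- 'while len(meses) < total: for mes in range(3, 11): …'
def pyA_outer (total : Int) (acc : List Int) : List Int :=
  if _h : (acc.length : Int) < total then
    pyA_outer total (pyA_inner total acc (PySem.List.pyRange 3 11 1))
  else acc
termination_by (total - acc.length).toNat
decreasing_by
  have hr : PySem.List.pyRange 3 11 1 = ([3, 4, 5, 6, 7, 8, 9, 10] : List Int) := by decide
  rw [hr]
  have hlt := pyA_inner_len_gt total 3 [4, 5, 6, 7, 8, 9, 10] acc
  omega

def gerar_meses_principais_py (total_rodadas : Int) : List Int :=
  let total := max total_rodadas 1
  let meses := PySem.List.pyRange 1 (min total 10 + 1) 1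
  pyA_outer total meses

-- ===== PORT B =====
def gerar_meses_principais_py_alt (total_rodadas : Int) : List Int :=
  let total := max total_rodadas 1
  (List.range total.toNat).map (fun i : Nat =>
    if i < 10 then (i : Int) + 1 else 3 + PySem.Int.mod ((i : Int) - 10) 8)

-- ===== PRECONDITION & SPEC =====
def Spec_gerar_meses_principais_py (total_rodadas : Int) (out : List Int) : Prop := out = gerar_meses_principais_py_alt total_rodadas
instance (total_rodadas : Int) (out : List Int) : Decidable (Spec_gerar_meses_principais_py total_rodadas out) := by unfold Spec_gerar_meses_principais_py; infer_instance

-- ===== CLAIM (what is proved, stated in full; the proofs are below) =====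
def Claim_equal_gerar_meses_principais_py : Prop := ∀ (total_rodadas : Int), Dom_gerar_meses_principais_py total_rodadas → Spec_gerar_meses_principais_py total_rodadas (gerar_meses_principais_py total_rodadas)

-- ===== LEMMAS AND PROOFS =====

-- the tail A produces: position j (counted from the end of the 1..10 prefix) holds 3 + j % 8
def pvCyc (n : Nat) : List Int := (List.range n).map (fun j => ((3 + j % 8 : Nat) : Int))

theorem pvCyc_small (n : Nat) (h : n ≤ 8) :
    pvCyc n = ([3, 4, 5, 6, 7, 8, 9, 10] : List Int).take n := by
  unfold pvCyc
  interval_cases n <;> decide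

theorem pvCyc_big (n : Nat) :
    pvCyc (8 + n) = ([3, 4, 5, 6, 7, 8, 9, 10] : List Int) ++ pvCyc n := by
  unfold pvCyc
  rw [List.range_add, List.map_append, List.map_map]
  have h1 : List.map (fun j : Nat => ((3 + j % 8 : Nat) : Int)) (List.range 8)
      = ([3, 4, 5, 6, 7, 8, 9, 10] : List Int) := by decide
  have h2 : List.map ((fun j : Nat => ((3 + j % 8 : Nat) : Int)) ∘ (fun x => 8 + x)) (List.range n)
      = List.map (fun j : Nat => ((3 + j % 8 : Nat) : Int)) (List.range n) :=
    List.map_congr_left (fun j _ => by simp)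
  rw [h1, h2]

theorem pyA_inner_eq (total : Int) (ms acc : List Int) (h : (acc.length : Int) < total) :
    pyA_inner total acc ms = acc ++ ms.take (total - acc.length).toNat := by
  induction ms generalizing acc with
  | nil => simp [pyA_inner]
  | cons m ms ih =>
    simp only [pyA_inner]
    split
    · rename_i h2
      have h2' : total ≤ (acc.length : Int) + 1 := by simpa using h2
      have : (total - (acc.length : Int)).toNat = 1 := by omega
      simp [this]
    · rename_i h2
      have h2' : ((acc.length : Int) + 1) < total := by
        simp only [not_le] at h2; simpa using h2
      rw [ih (acc ++ [m]) (by simpa using h2')]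
      have hlen : ((acc ++ [m]).length : Int) = (acc.length : Int) + 1 := by simp
      rw [hlen]
      have hk : (total - (acc.length : Int)).toNat
          = (total - ((acc.length : Int) + 1)).toNat + 1 := by omega
      rw [hk, List.take_succ_cons, List.append_assoc, List.singleton_append]

theorem pyA_outer_eq (total : Int) (acc : List Int) :
    pyA_outer total acc = acc ++ pvCyc (total - acc.length).toNat := by
  generalize hk : (total - (acc.length : Int)).toNat = k
  induction k using Nat.strong_induction_on generalizing acc with
  | _ k ih =>
    rw [pyA_outer]
    split
    · rename_i h
      have hr : PySem.List.pyRange 3 11 1 = ([3, 4, 5, 6, 7, 8, 9, 10] : List Int) := by decide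
      rw [hr, pyA_inner_eq total _ acc h]
      have hkpos : 1 ≤ k := by omega
      by_cases hle : k ≤ 8
      · -- final pass: exactly k more elements are appended, then the loop stops
        have hins : ([3, 4, 5, 6, 7, 8, 9, 10] : List Int).take (total - (acc.length : Int)).toNat
            = ([3, 4, 5, 6, 7, 8, 9, 10] : List Int).take k := by rw [hk]
        rw [hins]
        have hlen2 : ((acc ++ ([3, 4, 5, 6, 7, 8, 9, 10] : List Int).take k).length : Int)
            = (acc.length : Int) + k := by
          simp [List.length_take]; omega
        rw [ih 0 (by omega) _ (by rw [hlen2]; omega)]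
        rw [pvCyc_small k hle]
        simp [pvCyc]
      · -- full pass of eight, then recurse
        have htake : ([3, 4, 5, 6, 7, 8, 9, 10] : List Int).take (total - (acc.length : Int)).toNat
            = ([3, 4, 5, 6, 7, 8, 9, 10] : List Int) := by
          apply List.take_of_length_le; simp; omega
        rw [htake]
        have hlen2 : ((acc ++ ([3, 4, 5, 6, 7, 8, 9, 10] : List Int)).length : Int)
            = (acc.length : Int) + 8 := by simp
        rw [ih (k - 8) (by omega) _ (by rw [hlen2]; omega)]
        rw [List.append_assoc]
        congr 1
        have hk8 : k = 8 + (k - 8) := by omega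
        conv_rhs => rw [hk8]
        rw [pvCyc_big]
    · rename_i h
      have : (total - (acc.length : Int)).toNat = 0 := by omega
      rw [hk] at this
      simp [this, pvCyc]

theorem gerar_meses_principais_py_spec : Claim_equal_gerar_meses_principais_py := by
  intro total_rodadas _
  simp only [Spec_gerar_meses_principais_py, gerar_meses_principais_py, gerar_meses_principais_py_alt]
  set total := max total_rodadas 1 with htot
  have h1 : (1 : Int) ≤ total := le_max_right _ _
  set t : Nat := total.toNat with ht
  have htt : (t : Int) = total := Int.toNat_of_nonneg (by omega)
  set p : Nat := min t 10 with hp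
  have hpt : p ≤ t := min_le_left _ _
  have hp10 : p ≤ 10 := min_le_right _ _
  -- the prefix list(range(1, min(total, 10) + 1))
  have hpre : PySem.List.pyRange 1 (min total 10 + 1) 1
      = (List.range p).map (fun k : Nat => (1 : Int) + (k : Int)) := by
    rw [PySem.List.pyRange_one]
    have harg : (min total 10 + 1 - 1).toNat = p := by omega
    rw [harg]
  rw [hpre, pyA_outer_eq]
  simp only [List.length_map, List.length_range]
  have hcnt : (total - (p : Int)).toNat = t - p := by omega
  rw [hcnt]
  have hsplit : t = p + (t - p) := by omega
  conv_rhs => rw [hsplit, List.range_add, List.map_append, List.map_map]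
  congr 1
  · -- positions 0 .. p-1 : values 1 .. p
    apply List.map_congr_left
    intro k hk
    have hk10 : k < 10 := lt_of_lt_of_le (List.mem_range.mp hk) hp10
    simp only [if_pos hk10]
    omega
  · -- positions p .. t-1 : the 3..10 cycle
    by_cases hbig : 10 < t
    · have hp' : p = 10 := by omega
      unfold pvCyc
      apply List.map_congr_left
      intro j _
      simp only [Function.comp, hp']
      rw [if_neg (by omega)]
      rw [PySem.Int.mod_eq_emod_of_pos (by norm_num)]
      push_cast
      omega
    · have h0 : t - p = 0 := by omega
      simp [h0, pvCyc]
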